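-- pv_equiv track=rewrite | github.com/SammyDMartin/MADRLIV | IT.py | check_for_dependence
-- ===== SOURCE A (Python) =====
-- def check_for_dependence(old_counts,new_counts,irrelevant,candidates):
--     for A in candidates:
--         for B in candidates:
--             if A != B:
--                 if (A not in irrelevant) or (B not in irrelevant):
--                     if (old_counts[A]>old_counts[B]) and (new_counts[B]>new_counts[A]):
--                         return True
--     return False
-- ===== SOURCE B (Python) =====
-- def check_for_dependence(old_counts, new_counts, irrelevant, candidates):
--     # Sort candidates by old count, then make one pass keeping the running max
--     # new count over all / over relevant candidates in strictly lower old-count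
--     # blocks: a dependence exists iff some candidate's new count drops below the
--     # appropriate running max.  O(n log n) instead of A's quadratic pair scan.
--     irr = set(irrelevant)
--     cands = set(candidates)
--     # no pair of distinct candidates with a relevant member exists: nothing to check
--     if len(cands) < 2 or all(c in irr for c in cands):
--         return False
--     order = sorted(candidates, key=lambda c: old_counts[c])
--     max_all = max_rel = None   # maxima of new counts over old counts strictly below the current block
--     cur_all = cur_rel = None   # maxima of new counts including the current block
--     prev_old = None
--     for c in order:
--         o = old_counts[c]
--         v = new_counts[c]
--         if prev_old is None or o != prev_old:
--             max_all, max_rel = cur_all, cur_rel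
--             prev_old = o
--         if c in irr:
--             if max_rel is not None and max_rel > v:
--                 return True
--         else:
--             if max_all is not None and max_all > v:
--                 return True
--         if cur_all is None or v > cur_all:
--             cur_all = v
--         if c not in irr and (cur_rel is None or v > cur_rel):
--             cur_rel = v
--     return False
-- ===== Notes on version B (the rewrite author's own statement) =====
-- stated objective: faster
-- what changed: B replaces A's quadratic pair scan by an early exit when no qualifying pair exists, then a sort of the candidates by old count and one pass keeping the running maximum new count over all / over relevant candidates with strictly smaller old count, detecting a discordant pair as a drop below that maximum.
-- outside the precondition, e.g. on check_for_dependence({0: 1, 1: 0}, {0: 0, 1: 1}, set(), [0, 1, 5]): A returns True, B raises KeyError; on check_for_dependence({0: 0, 1: 0}, {}, set(), [0, 1]): A returns False, B raises KeyError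
import Mathlib
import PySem

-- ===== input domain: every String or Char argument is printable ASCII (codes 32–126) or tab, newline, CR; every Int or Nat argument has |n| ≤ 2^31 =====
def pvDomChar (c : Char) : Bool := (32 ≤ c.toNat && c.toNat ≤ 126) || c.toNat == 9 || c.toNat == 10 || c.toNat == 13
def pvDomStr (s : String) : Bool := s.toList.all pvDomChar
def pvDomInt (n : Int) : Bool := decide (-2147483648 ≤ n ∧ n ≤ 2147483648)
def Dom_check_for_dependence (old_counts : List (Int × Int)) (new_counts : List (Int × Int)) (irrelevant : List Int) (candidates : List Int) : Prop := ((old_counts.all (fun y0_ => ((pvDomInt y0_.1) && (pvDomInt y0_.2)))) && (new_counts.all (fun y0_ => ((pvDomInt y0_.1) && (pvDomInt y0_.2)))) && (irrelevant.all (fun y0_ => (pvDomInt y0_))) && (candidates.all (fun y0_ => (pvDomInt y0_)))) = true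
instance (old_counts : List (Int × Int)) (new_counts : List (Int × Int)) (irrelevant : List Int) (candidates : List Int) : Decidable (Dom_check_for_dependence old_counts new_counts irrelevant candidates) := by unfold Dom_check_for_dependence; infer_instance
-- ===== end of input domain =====

-- B sorts the candidates by old count and makes one pass keeping the running maximum new
-- count over strictly-lower old counts (all / relevant), instead of A's quadratic pair scan
-- (objective: faster; measured).

-- ===== PORT A =====
-- old_counts / new_counts are Python dicts (association lists), irrelevant and candidates
-- lists; dict lookup old_counts[A] is Dict.get? (none = KeyError, excluded by Pre_).
def check_for_dependence (old_counts : List (Int × Int)) (new_counts : List (Int × Int)) (irrelevant : List Int) (candidates : List Int) : Bool :=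
  candidates.any (fun a => candidates.any (fun b =>
    a != b &&
    (!(irrelevant.contains a) || !(irrelevant.contains b)) &&
    (match (PySem.Dict.mk old_counts).get? a, (PySem.Dict.mk old_counts).get? b with
     | some oa, some ob => oa > ob
     | _, _ => false) &&
    (match (PySem.Dict.mk new_counts).get? b, (PySem.Dict.mk new_counts).get? a with
     | some nb, some na => nb > na
     | _, _ => false)))

-- ===== PORT B =====
-- counts[c] of Source B; under Pre_ the key is always present, so the getD default is never consulted
def pvLook (counts : List (Int × Int)) (c : Int) : Int :=
  (PySem.Dict.mk counts).getD c 0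

-- 'm is not None and m > v' of Source B
def pvTrig (m : Option Int) (v : Int) : Bool :=
  match m with
  | some m => decide (v < m)
  | none => false

-- 'if cur is None or v > cur: cur = v' of Source B
def pvBump (cur : Option Int) (v : Int) : Option Int :=
  match cur with
  | none => some v
  | some m => if decide (m < v) then some v else some m

-- the for-loop of Source B over the sorted candidates; state (prev_old, max_all, max_rel, cur_all, cur_rel)
def pvLoopB (oc nc : List (Int × Int)) (irr : List Int) :
    List Int → Option Int → Option Int → Option Int → Option Int → Option Int → Bool
  | [], _, _, _, _, _ => false
  | c :: rest, prevOld, maxAll, maxRel, curAll, curRel =>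
    let o := pvLook oc c
    let v := pvLook nc c
    let upd : Bool := match prevOld with
      | none => true
      | some p => o != p
    let maxAll' := if upd then curAll else maxAll
    let maxRel' := if upd then curRel else maxRel
    let prevOld' := if upd then some o else prevOld
    if (if irr.contains c then pvTrig maxRel' v else pvTrig maxAll' v) then true
    else
      pvLoopB oc nc irr rest prevOld' maxAll' maxRel'
        (pvBump curAll v)
        (if !(irr.contains c) then pvBump curRel v else curRel)

def check_for_dependence_alt (old_counts : List (Int × Int)) (new_counts : List (Int × Int)) (irrelevant : List Int) (candidates : List Int) : Bool :=
  let irr := PySem.Set.ofList irrelevant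
  let cands := PySem.Set.ofList candidates
  -- no pair of distinct candidates with a relevant member exists: nothing to check
  if cands.length < 2 || cands.all (fun c => PySem.Set.contains irr c) then false
  else
    let order := PySem.List.sorted candidates (fun c => pvLook old_counts c) false
    pvLoopB old_counts new_counts irr order none none none none none

-- ===== PRECONDITION & SPEC =====
-- Pre_ excludes inputs where a pair of distinct candidates (not all irrelevant) exists but some
-- candidate is missing from one of the count dicts: B looks every candidate up while sorting and
-- raises KeyError there, whereas A's lazy pair scan may return without reaching the missing key
-- (early True, or never consulting new_counts) — see cites.
def Pre_check_for_dependence (old_counts : List (Int × Int)) (new_counts : List (Int × Int)) (irrelevant : List Int) (candidates : List Int) : Prop :=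
  (∀ c ∈ candidates, (PySem.Dict.mk old_counts).contains c = true ∧ (PySem.Dict.mk new_counts).contains c = true) ∨
  ((PySem.Set.ofList candidates).length < 2 ∨ ∀ c ∈ candidates, c ∈ irrelevant)
instance (old_counts : List (Int × Int)) (new_counts : List (Int × Int)) (irrelevant : List Int) (candidates : List Int) : Decidable (Pre_check_for_dependence old_counts new_counts irrelevant candidates) := by unfold Pre_check_for_dependence; infer_instance

def pvWitness_check_for_dependence : (List (Int × Int)) × (List (Int × Int)) × List Int × List Int :=
  ([(0, 1), (1, 0)], [(0, 0), (1, 1)], [1], [0, 1])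

def Spec_check_for_dependence (old_counts : List (Int × Int)) (new_counts : List (Int × Int)) (irrelevant : List Int) (candidates : List Int) (out : Bool) : Prop := out = check_for_dependence_alt old_counts new_counts irrelevant candidates
instance (old_counts : List (Int × Int)) (new_counts : List (Int × Int)) (irrelevant : List Int) (candidates : List Int) (out : Bool) : Decidable (Spec_check_for_dependence old_counts new_counts irrelevant candidates out) := by unfold Spec_check_for_dependence; infer_instance

-- ===== CLAIM (what is proved, stated in full; the proofs are below) =====
def Claim_equal_check_for_dependence : Prop := ∀ (old_counts : List (Int × Int)) (new_counts : List (Int × Int)) (irrelevant : List Int) (candidates : List Int), Dom_check_for_dependence old_counts new_counts irrelevant candidates → Pre_check_for_dependence old_counts new_counts irrelevant candidates → Spec_check_for_dependence old_counts new_counts irrelevant candidates (check_for_dependence old_counts new_counts irrelevant candidates)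

-- ===== LEMMAS AND PROOFS =====

-- the property both programs decide: a rank-discordant candidate pair, not both irrelevant
def HasDep (oc nc : List (Int × Int)) (irr : List Int) (l : List Int) : Prop :=
  ∃ a ∈ l, ∃ b ∈ l, (a ∉ irr ∨ b ∉ irr) ∧ pvLook oc b < pvLook oc a ∧ pvLook nc a < pvLook nc b

-- m is the maximum of the new counts over l (none iff l is empty)
def OMax (m : Option Int) (nc : List (Int × Int)) (l : List Int) : Prop :=
  match m with
  | none => l = []
  | some m => (∃ c ∈ l, pvLook nc c = m) ∧ ∀ c ∈ l, pvLook nc c ≤ m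

theorem pvTrig_true_iff (m : Option Int) (nc : List (Int × Int)) (l : List Int)
    (h : OMax m nc l) (v : Int) :
    pvTrig m v = true ↔ ∃ c ∈ l, v < pvLook nc c := by
  cases m with
  | none => unfold OMax at h; subst h; simp [pvTrig]
  | some m =>
    obtain ⟨⟨c, hc, hcm⟩, hub⟩ := h
    simp only [pvTrig, decide_eq_true_eq]
    constructor
    · intro hv; exact ⟨c, hc, by omega⟩
    · rintro ⟨d, hd, hvd⟩; exact lt_of_lt_of_le hvd (hub d hd)

theorem omax_bump (m : Option Int) (nc : List (Int × Int)) (l : List Int) (c : Int)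
    (h : OMax m nc l) : OMax (pvBump m (pvLook nc c)) nc (l ++ [c]) := by
  cases m with
  | none =>
    unfold OMax at h; subst h
    exact ⟨⟨c, by simp, rfl⟩, by simp⟩
  | some m =>
    obtain ⟨⟨d, hd, hdm⟩, hub⟩ := h
    by_cases hlt : m < pvLook nc c
    · simp only [pvBump, hlt, decide_true, if_true]
      refine ⟨⟨c, by simp, rfl⟩, ?_⟩
      intro e he
      rcases List.mem_append.mp he with h1 | h1
      · exact le_of_lt (lt_of_le_of_lt (hub e h1) hlt)
      · simp at h1; subst h1; exact le_refl _
    · simp only [pvBump, hlt, decide_false]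
      refine ⟨⟨d, by simp [hd], hdm⟩, ?_⟩
      intro e he
      rcases List.mem_append.mp he with h1 | h1
      · exact hub e h1
      · simp at h1; subst h1; omega

-- one loop iteration, with the block-shifted maxima mA / mR already described
theorem pvStep (oc nc : List (Int × Int)) (irr : List Int) (c : Int) (rest done : List Int)
    (mA mR curAll curRel : Option Int)
    (ih : ∀ (done : List Int) (prevOld maxAll maxRel curAll curRel : Option Int),
      (∀ d ∈ done, ∀ e ∈ rest, pvLook oc d ≤ pvLook oc e) →
      List.Pairwise (fun a b => pvLook oc a ≤ pvLook oc b) rest →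
      ¬ HasDep oc nc irr done →
      ((prevOld = none ∧ done = []) ∨
        (∃ p, prevOld = some p ∧ (∃ d ∈ done, pvLook oc d = p) ∧ ∀ d ∈ done, pvLook oc d ≤ p)) →
      OMax curAll nc done →
      OMax curRel nc (done.filter (fun d => !(irr.contains d))) →
      (match prevOld with
       | none => maxAll = none ∧ maxRel = none
       | some p => OMax maxAll nc (done.filter (fun d => decide (pvLook oc d < p))) ∧
                   OMax maxRel nc (done.filter (fun d => !(irr.contains d) && decide (pvLook oc d < p)))) →
      (pvLoopB oc nc irr rest prevOld maxAll maxRel curAll curRel = true ↔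
        HasDep oc nc irr (done ++ rest)))
    (hle : ∀ d ∈ done, ∀ e ∈ c :: rest, pvLook oc d ≤ pvLook oc e)
    (hpw : List.Pairwise (fun a b => pvLook oc a ≤ pvLook oc b) (c :: rest))
    (hnd : ¬ HasDep oc nc irr done)
    (hcurAll : OMax curAll nc done)
    (hcurRel : OMax curRel nc (done.filter (fun d => !(irr.contains d))))
    (hA : OMax mA nc (done.filter (fun d => decide (pvLook oc d < pvLook oc c))))
    (hR : OMax mR nc (done.filter (fun d => !(irr.contains d) && decide (pvLook oc d < pvLook oc c)))) :
    ((if (if irr.contains c then pvTrig mR (pvLook nc c) else pvTrig mA (pvLook nc c)) then true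
      else pvLoopB oc nc irr rest (some (pvLook oc c)) mA mR
        (pvBump curAll (pvLook nc c))
        (if !(irr.contains c) then pvBump curRel (pvLook nc c) else curRel)) = true ↔
      HasDep oc nc irr (done ++ c :: rest)) := by
  have hlec : ∀ d ∈ done, pvLook oc d ≤ pvLook oc c := fun d hd => hle d hd c (by simp)
  have hle' : ∀ d ∈ done ++ [c], ∀ e ∈ rest, pvLook oc d ≤ pvLook oc e := by
    intro d hd e he
    rw [List.mem_append, List.mem_singleton] at hd
    rcases hd with hd | rfl
    · exact hle d hd e (by simp [he])
    · exact (List.pairwise_cons.mp hpw).1 e he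
  have hprev' : (some (pvLook oc c) = (none : Option Int) ∧ done ++ [c] = []) ∨
      (∃ p, some (pvLook oc c) = some p ∧ (∃ d ∈ done ++ [c], pvLook oc d = p) ∧
        ∀ d ∈ done ++ [c], pvLook oc d ≤ p) := by
    refine Or.inr ⟨pvLook oc c, rfl, ⟨c, by simp, rfl⟩, ?_⟩
    intro d hd
    rw [List.mem_append, List.mem_singleton] at hd
    rcases hd with hd | rfl
    · exact hlec d hd
    · exact le_refl _
  have hcurAll' : OMax (pvBump curAll (pvLook nc c)) nc (done ++ [c]) :=
    omax_bump curAll nc done c hcurAll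
  have hA' : OMax mA nc ((done ++ [c]).filter (fun d => decide (pvLook oc d < pvLook oc c))) := by
    have heq : (done ++ [c]).filter (fun d => decide (pvLook oc d < pvLook oc c)) =
        done.filter (fun d => decide (pvLook oc d < pvLook oc c)) := by
      rw [List.filter_append]; simp
    rw [heq]; exact hA
  have hR' : OMax mR nc ((done ++ [c]).filter
      (fun d => !(irr.contains d) && decide (pvLook oc d < pvLook oc c))) := by
    have heq : (done ++ [c]).filter (fun d => !(irr.contains d) && decide (pvLook oc d < pvLook oc c)) =
        done.filter (fun d => !(irr.contains d) && decide (pvLook oc d < pvLook oc c)) := by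
      rw [List.filter_append]; simp
    rw [heq]; exact hR
  have happ : (done ++ [c]) ++ rest = done ++ c :: rest := by
    rw [List.append_assoc]; simp
  by_cases hcir : irr.contains c = true
  · -- c is irrelevant: the relevant-only maximum is consulted
    have hcmem : c ∈ irr := List.contains_iff_mem.mp hcir
    by_cases htrig : pvTrig mR (pvLook nc c) = true
    · simp only [hcir, if_true, htrig, true_iff]
      obtain ⟨d, hd, hvd⟩ := (pvTrig_true_iff mR nc _ hR _).mp htrig
      rw [List.mem_filter] at hd
      obtain ⟨hdin, hcond⟩ := hd
      simp only [Bool.and_eq_true, Bool.not_eq_eq_eq_not, Bool.not_true, decide_eq_true_eq] at hcond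
      refine ⟨c, by simp, d, by simp [hdin], Or.inr ?_, hcond.2, hvd⟩
      intro hmem
      rw [← List.contains_iff_mem] at hmem
      rw [hcond.1] at hmem; exact Bool.false_ne_true hmem
    · -- no hit: recurse with done ++ [c]
      have hnd' : ¬ HasDep oc nc irr (done ++ [c]) := by
        rintro ⟨a, ha, b, hb, hrel, hlt1, hlt2⟩
        rw [List.mem_append, List.mem_singleton] at ha hb
        rcases ha with ha | rfl <;> rcases hb with hb | rfl
        · exact hnd ⟨a, ha, b, hb, hrel, hlt1, hlt2⟩
        · exact absurd hlt1 (not_lt.mpr (hlec a ha))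
        · -- a = c irrelevant, so b must be relevant: the relevant maximum would have fired
          have hbrel : ¬ b ∈ irr := by
            rcases hrel with h1 | h1
            · exact absurd hcmem h1
            · exact h1
          apply htrig
          rw [pvTrig_true_iff mR nc _ hR]
          refine ⟨b, List.mem_filter.mpr ⟨hb, ?_⟩, hlt2⟩
          simp only [Bool.and_eq_true, Bool.not_eq_eq_eq_not, Bool.not_true, decide_eq_true_eq]
          exact ⟨by rw [← Bool.not_eq_true, List.contains_iff_mem]; exact hbrel, hlt1⟩
        · exact absurd hlt1 (lt_irrefl _)
      have hcurRel' : OMax curRel nc ((done ++ [c]).filter (fun d => !(irr.contains d))) := by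
        have heq : (done ++ [c]).filter (fun d => !(irr.contains d)) =
            done.filter (fun d => !(irr.contains d)) := by
          rw [List.filter_append]; simp [hcmem]
        rw [heq]; exact hcurRel
      simp only [hcir, if_true, htrig, Bool.false_eq_true, if_false, Bool.not_true]
      rw [ih (done ++ [c]) (some (pvLook oc c)) mA mR (pvBump curAll (pvLook nc c)) curRel
        hle' (List.pairwise_cons.mp hpw).2 hnd' hprev' hcurAll' hcurRel' ⟨hA', hR'⟩, happ]
  · -- c is relevant: the all-candidates maximum is consulted
    have hcirf : irr.contains c = false := by
      cases h : irr.contains c with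
      | false => rfl
      | true => exact absurd h hcir
    have hcmem : c ∉ irr := by
      intro h; rw [← List.contains_iff_mem, hcirf] at h; exact Bool.false_ne_true h
    by_cases htrig : pvTrig mA (pvLook nc c) = true
    · simp only [hcirf, Bool.false_eq_true, if_false, htrig, if_true, true_iff]
      obtain ⟨d, hd, hvd⟩ := (pvTrig_true_iff mA nc _ hA _).mp htrig
      rw [List.mem_filter] at hd
      obtain ⟨hdin, hcond⟩ := hd
      simp only [decide_eq_true_eq] at hcond
      exact ⟨c, by simp, d, by simp [hdin], Or.inl hcmem, hcond, hvd⟩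
    · have hnd' : ¬ HasDep oc nc irr (done ++ [c]) := by
        rintro ⟨a, ha, b, hb, hrel, hlt1, hlt2⟩
        rw [List.mem_append, List.mem_singleton] at ha hb
        rcases ha with ha | rfl <;> rcases hb with hb | rfl
        · exact hnd ⟨a, ha, b, hb, hrel, hlt1, hlt2⟩
        · exact absurd hlt1 (not_lt.mpr (hlec a ha))
        · apply htrig
          rw [pvTrig_true_iff mA nc _ hA]
          exact ⟨b, List.mem_filter.mpr ⟨hb, by simpa using hlt1⟩, hlt2⟩
        · exact absurd hlt1 (lt_irrefl _)
      have hcurRel' : OMax (pvBump curRel (pvLook nc c)) nc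
          ((done ++ [c]).filter (fun d => !(irr.contains d))) := by
        have heq : (done ++ [c]).filter (fun d => !(irr.contains d)) =
            done.filter (fun d => !(irr.contains d)) ++ [c] := by
          rw [List.filter_append]; simp [hcmem]
        rw [heq]; exact omax_bump curRel nc _ c hcurRel
      simp only [hcirf, Bool.false_eq_true, if_false, htrig, Bool.not_false, if_true]
      rw [ih (done ++ [c]) (some (pvLook oc c)) mA mR (pvBump curAll (pvLook nc c))
        (pvBump curRel (pvLook nc c))
        hle' (List.pairwise_cons.mp hpw).2 hnd' hprev' hcurAll' hcurRel' ⟨hA', hR'⟩, happ]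

-- the loop invariant: processing rest after done (sorted, no dependence found yet) decides
-- whether the whole list has a dependence
theorem pvLoopB_invariant (oc nc : List (Int × Int)) (irr : List Int) :
    ∀ (rest done : List Int) (prevOld maxAll maxRel curAll curRel : Option Int),
    (∀ d ∈ done, ∀ e ∈ rest, pvLook oc d ≤ pvLook oc e) →
    List.Pairwise (fun a b => pvLook oc a ≤ pvLook oc b) rest →
    ¬ HasDep oc nc irr done →
    ((prevOld = none ∧ done = []) ∨
      (∃ p, prevOld = some p ∧ (∃ d ∈ done, pvLook oc d = p) ∧ ∀ d ∈ done, pvLook oc d ≤ p)) →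
    OMax curAll nc done →
    OMax curRel nc (done.filter (fun d => !(irr.contains d))) →
    (match prevOld with
     | none => maxAll = none ∧ maxRel = none
     | some p => OMax maxAll nc (done.filter (fun d => decide (pvLook oc d < p))) ∧
                 OMax maxRel nc (done.filter (fun d => !(irr.contains d) && decide (pvLook oc d < p)))) →
    (pvLoopB oc nc irr rest prevOld maxAll maxRel curAll curRel = true ↔
      HasDep oc nc irr (done ++ rest)) := by
  intro rest
  induction rest with
  | nil =>
    intro done prevOld maxAll maxRel curAll curRel _ _ hnd _ _ _ _
    simp only [pvLoopB, List.append_nil]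
    exact ⟨fun h => absurd h (by simp), fun h => absurd h hnd⟩
  | cons c rest ih =>
    intro done prevOld maxAll maxRel curAll curRel hle hpw hnd hprev hcurAll hcurRel hmax
    have hlec : ∀ d ∈ done, pvLook oc d ≤ pvLook oc c := fun d hd => hle d hd c (by simp)
    rcases hprev with ⟨hpn, hde⟩ | ⟨p, hpp, ⟨d0, hd0, hd0p⟩, hub⟩
    · -- first iteration: done = [], block shift installs the empty maxima
      subst hpn; subst hde
      simp only [pvLoopB]
      exact pvStep oc nc irr c rest [] curAll curRel curAll curRel ih hle hpw hnd hcurAll hcurRel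
        (by simpa using hcurAll) (by simpa using hcurRel)
    · subst hpp
      simp only at hmax
      by_cases hop : pvLook oc c = p
      · -- same block: the shifted maxima stay
        rw [← hop] at hmax hub ⊢
        have hbne : ((pvLook oc c : Int) != pvLook oc c) = false := by simp
        simp only [pvLoopB, hbne, Bool.false_eq_true, if_false]
        exact pvStep oc nc irr c rest done maxAll maxRel curAll curRel ih hle hpw hnd hcurAll hcurRel
          hmax.1 hmax.2
      · -- new block: the current maxima become the shifted maxima
        have hplt : p < pvLook oc c := by
          have h1 := hlec d0 hd0; rw [hd0p] at h1; omega
        have hbne : ((pvLook oc c : Int) != p) = true := by simp [hop]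
        simp only [pvLoopB, hbne, if_true]
        refine pvStep oc nc irr c rest done curAll curRel curAll curRel ih hle hpw hnd hcurAll hcurRel ?_ ?_
        · rw [List.filter_eq_self.mpr]
          · exact hcurAll
          · intro d hd
            have h1 := hub d hd
            simp only [decide_eq_true_eq]; omega
        · have heq : done.filter (fun d => !(irr.contains d) && decide (pvLook oc d < pvLook oc c)) =
              done.filter (fun d => !(irr.contains d)) := by
            apply List.filter_congr
            intro d hd
            have h1 := hub d hd
            have h2 : decide (pvLook oc d < pvLook oc c) = true := by
              simp only [decide_eq_true_eq]; omega
            rw [h2, Bool.and_true]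
          rw [heq]; exact hcurRel

theorem pvGet_of_contains (oc : List (Int × Int)) (c : Int)
    (h : (PySem.Dict.mk oc).contains c = true) :
    (PySem.Dict.mk oc).get? c = some (pvLook oc c) := by
  cases hg : (PySem.Dict.mk oc).get? c with
  | none =>
    rw [PySem.Dict.get?_eq_none_iff_contains] at hg
    rw [hg] at h; exact absurd h (by simp)
  | some v =>
    simp [pvLook, PySem.Dict.getD, hg]

-- A's double scan decides HasDep (the 'a ≠ b' guard is implied by the strict old-count inequality)
theorem checkA_iff (oc nc : List (Int × Int)) (irr cs : List Int)
    (hpre : ∀ c ∈ cs, (PySem.Dict.mk oc).contains c = true ∧ (PySem.Dict.mk nc).contains c = true) :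
    (check_for_dependence oc nc irr cs = true ↔ HasDep oc nc irr cs) := by
  unfold check_for_dependence HasDep
  simp only [List.any_eq_true]
  constructor
  · rintro ⟨a, ha, b, hb, h⟩
    rw [pvGet_of_contains oc a ((hpre a ha).1), pvGet_of_contains oc b ((hpre b hb).1),
      pvGet_of_contains nc a ((hpre a ha).2), pvGet_of_contains nc b ((hpre b hb).2)] at h
    simp only [Bool.and_eq_true, bne_iff_ne, ne_eq, Bool.or_eq_true, Bool.not_eq_eq_eq_not,
      Bool.not_true, gt_iff_lt, decide_eq_true_eq] at h
    obtain ⟨⟨⟨_, hrel⟩, h1⟩, h2⟩ := h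
    refine ⟨a, ha, b, hb, ?_, h1, h2⟩
    rcases hrel with h3 | h3
    · exact Or.inl (fun hm => by rw [← List.contains_iff_mem] at hm; rw [h3] at hm; exact Bool.false_ne_true hm)
    · exact Or.inr (fun hm => by rw [← List.contains_iff_mem] at hm; rw [h3] at hm; exact Bool.false_ne_true hm)
  · rintro ⟨a, ha, b, hb, hrel, h1, h2⟩
    refine ⟨a, ha, b, hb, ?_⟩
    rw [pvGet_of_contains oc a ((hpre a ha).1), pvGet_of_contains oc b ((hpre b hb).1),
      pvGet_of_contains nc a ((hpre a ha).2), pvGet_of_contains nc b ((hpre b hb).2)]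
    simp only [Bool.and_eq_true, bne_iff_ne, ne_eq, Bool.or_eq_true, Bool.not_eq_eq_eq_not,
      Bool.not_true, gt_iff_lt, decide_eq_true_eq]
    refine ⟨⟨⟨?_, ?_⟩, h1⟩, h2⟩
    · intro heq; subst heq; exact absurd h1 (lt_irrefl _)
    · rcases hrel with h3 | h3
      · exact Or.inl (by cases h4 : irr.contains a with
          | false => rfl
          | true => exact absurd (List.contains_iff_mem.mp h4) h3)
      · exact Or.inr (by cases h4 : irr.contains b with
          | false => rfl
          | true => exact absurd (List.contains_iff_mem.mp h4) h3)

theorem hasdep_congr (oc nc : List (Int × Int)) (i1 i2 l1 l2 : List Int)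
    (hi : ∀ x : Int, x ∈ i1 ↔ x ∈ i2) (hl : ∀ x : Int, x ∈ l1 ↔ x ∈ l2) :
    HasDep oc nc i1 l1 ↔ HasDep oc nc i2 l2 := by
  unfold HasDep
  constructor
  · rintro ⟨a, ha, b, hb, hrel, h1, h2⟩
    refine ⟨a, (hl a).mp ha, b, (hl b).mp hb, ?_, h1, h2⟩
    rcases hrel with h3 | h3
    · exact Or.inl (fun hm => h3 ((hi a).mpr hm))
    · exact Or.inr (fun hm => h3 ((hi b).mpr hm))
  · rintro ⟨a, ha, b, hb, hrel, h1, h2⟩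
    refine ⟨a, (hl a).mpr ha, b, (hl b).mpr hb, ?_, h1, h2⟩
    rcases hrel with h3 | h3
    · exact Or.inl (fun hm => h3 ((hi a).mp hm))
    · exact Or.inr (fun hm => h3 ((hi b).mp hm))

-- the guard: fewer than two distinct candidates, or every candidate irrelevant
def Degenerate (irr cs : List Int) : Prop :=
  (∀ a ∈ cs, ∀ b ∈ cs, a = b) ∨ (∀ c ∈ cs, c ∈ irr)

theorem degenerate_of_guard (irr cs : List Int)
    (h : ((PySem.Set.ofList cs).length < 2 || (PySem.Set.ofList cs).all
      (fun c => PySem.Set.contains (PySem.Set.ofList irr) c)) = true) :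
    Degenerate irr cs := by
  rcases Bool.or_eq_true_iff.mp h with h1 | h1
  · left
    intro a ha b hb
    rw [← PySem.Set.mem_ofList (xs := cs)] at ha hb
    match hl : PySem.Set.ofList cs with
    | [] => rw [hl] at ha; exact absurd ha (List.not_mem_nil)
    | [x] =>
      rw [hl, List.mem_singleton] at ha hb; rw [ha, hb]
    | x :: y :: t =>
      rw [hl] at h1; simp at h1
  · right
    intro c hc
    rw [List.all_eq_true] at h1
    have := h1 c ((PySem.Set.mem_ofList cs c).mpr hc)
    rw [PySem.Set.contains_eq_listContains, List.contains_iff_mem, PySem.Set.mem_ofList] at this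
    exact this

theorem guard_of_degenerate (irr cs : List Int) (h : Degenerate irr cs) :
    ((PySem.Set.ofList cs).length < 2 || (PySem.Set.ofList cs).all
      (fun c => PySem.Set.contains (PySem.Set.ofList irr) c)) = true := by
  rcases h with h1 | h1
  · apply Bool.or_eq_true_iff.mpr; left
    match hl : PySem.Set.ofList cs with
    | [] => simp
    | [x] => simp
    | x :: y :: t =>
      have hx : x ∈ cs := (PySem.Set.mem_ofList cs x).mp (by rw [hl]; simp)
      have hy : y ∈ cs := (PySem.Set.mem_ofList cs y).mp (by rw [hl]; simp)
      have hnd := PySem.Set.nodup_ofList (xs := cs)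
      rw [hl] at hnd
      have : x ≠ y := by
        intro he; rw [he] at hnd; exact (List.nodup_cons.mp hnd).1 (by simp)
      exact absurd (h1 x hx y hy) this
  · apply Bool.or_eq_true_iff.mpr; right
    rw [List.all_eq_true]
    intro c hc
    rw [PySem.Set.contains_eq_listContains, List.contains_iff_mem, PySem.Set.mem_ofList]
    exact h1 c ((PySem.Set.mem_ofList cs c).mp hc)

-- A returns False on a degenerate input without consulting the dicts
theorem checkA_false_of_degenerate (oc nc : List (Int × Int)) (irr cs : List Int)
    (h : Degenerate irr cs) : check_for_dependence oc nc irr cs = false := by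
  unfold check_for_dependence
  rw [← Bool.not_eq_true]
  intro hx
  rw [List.any_eq_true] at hx
  obtain ⟨a, ha, hx⟩ := hx
  rw [List.any_eq_true] at hx
  obtain ⟨b, hb, hcond⟩ := hx
  simp only [Bool.and_eq_true, bne_iff_ne, ne_eq, Bool.or_eq_true, Bool.not_eq_eq_eq_not,
    Bool.not_true] at hcond
  obtain ⟨⟨⟨hab, hrel⟩, _⟩, _⟩ := hcond
  rcases h with hd | hd
  · exact hab (hd a ha b hb)
  · rcases hrel with h3 | h3
    · rw [List.contains_iff_mem.mpr (hd a ha)] at h3; exact absurd h3 (by simp)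
    · rw [List.contains_iff_mem.mpr (hd b hb)] at h3; exact absurd h3 (by simp)

theorem checkB_iff (oc nc : List (Int × Int)) (irr cs : List Int)
    (hg : ((PySem.Set.ofList cs).length < 2 || (PySem.Set.ofList cs).all
      (fun c => PySem.Set.contains (PySem.Set.ofList irr) c)) = false) :
    (check_for_dependence_alt oc nc irr cs = true ↔ HasDep oc nc irr cs) := by
  unfold check_for_dependence_alt
  simp only [hg, Bool.false_eq_true, if_false]
  rw [pvLoopB_invariant oc nc (PySem.Set.ofList irr)
      (PySem.List.sorted cs (fun c => pvLook oc c) false) [] none none none none none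
      (by intro d hd; simp at hd)
      (PySem.List.sorted_pairwise cs (fun c => pvLook oc c))
      (by rintro ⟨a, ha, _⟩; simp at ha)
      (Or.inl ⟨rfl, rfl⟩) rfl rfl ⟨rfl, rfl⟩]
  rw [List.nil_append]
  exact hasdep_congr oc nc _ irr _ cs
    (fun x => PySem.Set.mem_ofList irr x)
    (fun x => PySem.List.mem_sorted cs (fun c => pvLook oc c) false x)

theorem check_for_dependence_spec : Claim_equal_check_for_dependence := by
  intro oc nc irr cs _hdom hpre
  unfold Spec_check_for_dependence
  by_cases hg : ((PySem.Set.ofList cs).length < 2 || (PySem.Set.ofList cs).all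
      (fun c => PySem.Set.contains (PySem.Set.ofList irr) c)) = true
  · -- degenerate input: both return False
    have hdeg := degenerate_of_guard irr cs hg
    rw [checkA_false_of_degenerate oc nc irr cs hdeg]
    unfold check_for_dependence_alt
    simp only [hg, if_true]
  · -- a qualifying pair exists, so Pre_'s first disjunct must hold
    rw [Bool.not_eq_true] at hg
    have hpre' : ∀ c ∈ cs, (PySem.Dict.mk oc).contains c = true ∧ (PySem.Dict.mk nc).contains c = true := by
      rcases hpre with h | h
      · exact h
      · exfalso
        have hdeg : Degenerate irr cs := by
          rcases h with h1 | h1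
          · left
            intro a ha b hb
            rw [← PySem.Set.mem_ofList (xs := cs)] at ha hb
            match hl : PySem.Set.ofList cs with
            | [] => rw [hl] at ha; exact absurd ha (List.not_mem_nil)
            | [x] => rw [hl, List.mem_singleton] at ha hb; rw [ha, hb]
            | x :: y :: t => rw [hl] at h1; simp at h1
          · exact Or.inr h1
        have hgt := guard_of_degenerate irr cs hdeg
        rw [hg] at hgt
        exact Bool.false_ne_true hgt
    rw [Bool.eq_iff_iff, checkA_iff oc nc irr cs hpre', checkB_iff oc nc irr cs hg]
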